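-- pv_equiv track=rewrite | github.com/yunjs24/boj-archive | 11727/11727.py | solution
-- ===== SOURCE A (Python) =====
-- ans = [0]*1001
--
-- def solution(n):
--     if n==1:
--         return 1
--     if n==2:
--         return 3
--     if ans[n]:
--         return ans[n]
--     prev = 2*solution(n-2)
--     next = solution(n-1)
--     ans[n] = prev + next
--     return ans[n]
-- ===== SOURCE B (Python) =====
-- def solution(n):
--     if n == 1:
--         return 1
--     if n == 2:
--         return 3
--     a, b = 1, 3
--     for _ in range(3, n + 1):
--         a, b = b, b + 2 * a
--     return b
-- ===== Notes on version B (the rewrite author's own statement) =====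
-- stated objective: simpler
-- what changed: Replaces the memoized global-array recursion with a bottom-up two-variable iteration over the same recurrence f(n)=f(n-1)+2*f(n-2); no global state, no 1001-slot table, no recursion.
-- outside the precondition, e.g. on solution(0): A raises IndexError, B returns 3
import Mathlib
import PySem

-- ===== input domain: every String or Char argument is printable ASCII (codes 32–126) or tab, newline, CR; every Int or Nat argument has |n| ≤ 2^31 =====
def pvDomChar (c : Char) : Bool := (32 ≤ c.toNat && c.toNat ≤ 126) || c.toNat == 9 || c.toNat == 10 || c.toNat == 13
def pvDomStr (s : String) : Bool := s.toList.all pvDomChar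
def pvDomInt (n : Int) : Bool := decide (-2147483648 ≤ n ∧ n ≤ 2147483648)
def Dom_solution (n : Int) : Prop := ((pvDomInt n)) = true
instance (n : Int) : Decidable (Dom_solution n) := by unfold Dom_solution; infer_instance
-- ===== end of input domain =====

-- B replaces A's memoized global-array recursion by a bottom-up two-variable loop
-- over the same recurrence (simpler: no global state, O(1) space). Equivalence is
-- about the return value of a call from the initial (all-zero) memo state; A also
-- mutates the global `ans` array, which B does not.

-- ===== PORT A =====
-- A's recursion with the global memo array threaded through as state; fuel bounds
-- the recursion depth (n+1 suffices on Pre_).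
def solutionA : Nat → Int → List Int → Option (Int × List Int)
  | 0, _, _ => none
  | fuel+1, n, ans =>
    if n = 1 then some (1, ans)
    else if n = 2 then some (3, ans)
    else
      (PySem.List.pyGet? ans n).bind fun v =>
        if v ≠ 0 then some (v, ans)
        else
          (solutionA fuel (n-2) ans).bind fun pa =>
            let prev := 2 * pa.1
            (solutionA fuel (n-1) pa.2).bind fun na =>
              (PySem.List.pySet? na.2 n (prev + na.1)).bind fun ans3 =>
                (PySem.List.pyGet? ans3 n).map fun r => (r, ans3)

def solution (n : Int) : Int :=
  ((solutionA (n.toNat + 1) n (List.replicate 1001 0)).map Prod.fst).getD 0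

-- ===== PORT B =====
def solution_alt (n : Int) : Int :=
  if n = 1 then 1
  else if n = 2 then 3
  else
    ((PySem.List.pyRange 3 (n+1) 1).foldl
      (fun (p : Int × Int) _ => (p.2, p.2 + 2 * p.1)) (1, 3)).2

-- ===== PRECONDITION & SPEC =====
-- Pre_ excludes exactly the inputs on which A raises from the initial state:
-- n ≤ 0 and n > 1000 both end in an IndexError on the 1001-slot global array.
def Pre_solution (n : Int) : Prop := 1 ≤ n ∧ n ≤ 1000
instance (n : Int) : Decidable (Pre_solution n) := by unfold Pre_solution; infer_instance
def pvWitness_solution : Int := (7)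

def Spec_solution (n : Int) (out : Int) : Prop := out = solution_alt n
instance (n : Int) (out : Int) : Decidable (Spec_solution n out) := by unfold Spec_solution; infer_instance

-- ===== CLAIM (what is proved, stated in full; the proofs are below) =====
def Claim_equal_solution : Prop := ∀ (n : Int), Dom_solution n → Pre_solution n → Spec_solution n (solution n)

-- ===== LEMMAS AND PROOFS =====

-- the mathematical recurrence (f2 0 is an unused placeholder)
def f2 : Nat → Int
  | 0 => 0
  | 1 => 1
  | 2 => 3
  | n+3 => f2 (n+2) + 2 * f2 (n+1)

lemma f2_rec (k : Nat) (h : 3 ≤ k) : f2 k = f2 (k-1) + 2 * f2 (k-2) := by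
  obtain ⟨m, rfl⟩ : ∃ m, k = m + 3 := ⟨k - 3, by omega⟩
  simp [f2]

-- B-side: the fold computes the pair (f2 (k-1), f2 k)
lemma alt_fold (k : Nat) (h : 2 ≤ k) :
    (PySem.List.pyRange 3 ((k : Int)+1) 1).foldl
      (fun (p : Int × Int) _ => (p.2, p.2 + 2 * p.1)) (1, 3) = (f2 (k-1), f2 k) := by
  induction k with
  | zero => omega
  | succ m ih =>
    rcases Nat.lt_or_ge m 2 with hm | hm
    · interval_cases m
      · omega
      · norm_num [PySem.List.pyRange_one_eq_nil, f2]
    · have hsplit : PySem.List.pyRange 3 ((m : Int) + 1 + 1) 1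
          = PySem.List.pyRange 3 ((m : Int) + 1) 1 ++ [(m : Int) + 1] := by
        have := PySem.List.pyRange_one_succ_right (a := 3) (b := (m : Int) + 1) (by omega)
        simpa using this
      have : ((m : Int) + 1) + 1 = ((m : Int) + 1 + 1) := by ring
      rw [show ((m + 1 : Nat) : Int) + 1 = (m : Int) + 1 + 1 by push_cast; ring, hsplit,
        List.foldl_append, ih hm]
      have h3 : 3 ≤ m + 1 := by omega
      have hr := f2_rec (m + 1) h3
      have e1 : m + 1 - 1 = m := by omega
      have e2 : m + 1 - 2 = m - 1 := by omega
      rw [e1, e2] at hr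
      simp only [List.foldl_cons, List.foldl_nil]
      rw [e1, hr]

lemma alt_eq_f2 (k : Nat) (h : 1 ≤ k) : solution_alt (k : Int) = f2 k := by
  rcases Nat.lt_or_ge k 3 with hk | hk
  · interval_cases k <;> simp [solution_alt, f2]
  · have h1 : ((k : Int) ≠ 1) := by omega
    have h2 : ((k : Int) ≠ 2) := by omega
    rw [solution_alt, if_neg h1, if_neg h2, alt_fold k (by omega)]

-- A-side memo invariant: every nonzero entry stores the true value
def MemoInv (ans : List Int) : Prop := ∀ i (h : i < ans.length), ans[i] ≠ 0 → ans[i] = f2 i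

lemma solA_ok : ∀ (k fuel : Nat) (ans : List Int), 1 ≤ k → k ≤ 1000 → k ≤ fuel →
    ans.length = 1001 → MemoInv ans →
    ∃ ans', solutionA fuel (k : Int) ans = some (f2 k, ans')
      ∧ ans'.length = 1001 ∧ MemoInv ans' := by
  intro k
  induction k using Nat.strong_induction_on with
  | _ k ih =>
    intro fuel ans h1 h1000 hfuel hlen hinv
    obtain ⟨f, rfl⟩ : ∃ f, fuel = f + 1 := ⟨fuel - 1, by omega⟩
    rcases Nat.lt_or_ge k 3 with hk | hk
    · interval_cases k
      · exact ⟨ans, by simp [solutionA, f2], hlen, hinv⟩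
      · exact ⟨ans, by simp [solutionA, f2], hlen, hinv⟩
    · have hne1 : ((k : Int) ≠ 1) := by omega
      have hne2 : ((k : Int) ≠ 2) := by omega
      have hklt : k < ans.length := by omega
      have hget : PySem.List.pyGet? ans (k : Int) = some ans[k] := by
        simp [PySem.List.pyGet?_natCast, List.getElem?_eq_getElem hklt]
      by_cases hz : ans[k] = 0
      · -- memo miss: recurse
        have e2 : ((k : Int) - 2) = ((k - 2 : Nat) : Int) := by omega
        have e1 : ((k : Int) - 1) = ((k - 1 : Nat) : Int) := by omega
        obtain ⟨ans1, hA1, hlen1, hinv1⟩ :=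
          ih (k - 2) (by omega) f ans (by omega) (by omega) (by omega) hlen hinv
        obtain ⟨ans2, hA2, hlen2, hinv2⟩ :=
          ih (k - 1) (by omega) f ans1 (by omega) (by omega) (by omega) hlen1 hinv1
        have hklt2 : k < ans2.length := by omega
        have hset : PySem.List.pySet? ans2 (k : Int) (2 * f2 (k-2) + f2 (k-1))
            = some (ans2.set k (2 * f2 (k-2) + f2 (k-1))) := by
          exact PySem.List.pySet?_natCast ans2 k _ hklt2
        have hval : 2 * f2 (k - 2) + f2 (k - 1) = f2 k := by rw [f2_rec k hk]; ring
        have hget3 : PySem.List.pyGet? (ans2.set k (2 * f2 (k-2) + f2 (k-1))) (k : Int)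
            = some (2 * f2 (k-2) + f2 (k-1)) := by
          rw [PySem.List.pyGet?_natCast]
          exact List.getElem?_set_self hklt2
        refine ⟨ans2.set k (2 * f2 (k-2) + f2 (k-1)), ?_, by simpa using hlen2, ?_⟩
        · rw [solutionA]
          simp only [if_neg hne1, if_neg hne2, hget, Option.bind_some,
            if_neg (show ¬ (ans[k] ≠ 0) by simp [hz]), e2, hA1, e1, hA2]
          simp only [hset, Option.bind_some, hget3, Option.map_some]
          rw [hval]
        · intro i hi hnz
          rw [List.getElem_set] at hnz ⊢
          by_cases hik : k = i
          · subst hik; simp [hval]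
          · simp only [if_neg hik] at hnz ⊢
            exact hinv2 i (by simpa [List.length_set] using hi) hnz
      · -- memo hit
        refine ⟨ans, ?_, hlen, hinv⟩
        rw [solutionA]
        simp only [if_neg hne1, if_neg hne2, hget, Option.bind_some]
        rw [if_pos hz, hinv k hklt hz]

-- ===== VERDICT (by name: the statement is the Claim_ definition above) =====
theorem solution_spec : Claim_equal_solution := by
  intro n _ hpre
  obtain ⟨h1, h2⟩ := hpre
  obtain ⟨k, rfl⟩ : ∃ k : Nat, n = (k : Int) := ⟨n.toNat, by omega⟩
  have hk1 : 1 ≤ k := by omega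
  have hk2 : k ≤ 1000 := by omega
  have hinv0 : MemoInv (List.replicate 1001 0) := by
    intro i hi hnz
    rw [List.getElem_replicate] at hnz
    exact absurd rfl hnz
  obtain ⟨ans', hA, _, _⟩ := solA_ok k (((k : Int)).toNat + 1) (List.replicate 1001 0)
    hk1 hk2 (by omega) (List.length_replicate) hinv0
  show solution _ = solution_alt _
  rw [solution, hA, alt_eq_f2 k hk1]
  rfl
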